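-- pv_equiv track=rewrite | github.com/detectAna/detectAna | exploratory_analysis/TweetPreprocessor.py | strip_hashtags
-- ===== SOURCE A (Python) =====
-- import string
--
-- def strip_hashtags(text):
--     entity_prefixes = ['#']
--     for separator in string.punctuation:
--         if separator not in entity_prefixes:
--             text = text.replace(separator, ' ')
--     words = []
--     for word in text.split():
--         word = word.strip()
--         if word:
--             if word[0] not in entity_prefixes:
--                 words.append(word)
--     return ' '.join(words)
-- ===== SOURCE B (Python) =====
-- import string
--
-- def strip_hashtags(text):
--     seps = set(string.punctuation) - {'#'}
--     tokens = []
--     buf = []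
--     for ch in text:
--         if ch in seps or ch.isspace():
--             if buf and buf[0] != '#':
--                 tokens.append(''.join(buf))
--             buf = []
--         else:
--             buf.append(ch)
--     if buf and buf[0] != '#':
--         tokens.append(''.join(buf))
--     return ' '.join(tokens)
-- ===== Notes on version B (the rewrite author's own statement) =====
-- stated objective: faster
-- what changed: Replaces A's 31 full-string replace() passes followed by split() and a filtering loop with a single character-at-a-time tokenizing scan that flushes buffered tokens at separator/whitespace characters and drops '#'-initial tokens.
import Mathlib
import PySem

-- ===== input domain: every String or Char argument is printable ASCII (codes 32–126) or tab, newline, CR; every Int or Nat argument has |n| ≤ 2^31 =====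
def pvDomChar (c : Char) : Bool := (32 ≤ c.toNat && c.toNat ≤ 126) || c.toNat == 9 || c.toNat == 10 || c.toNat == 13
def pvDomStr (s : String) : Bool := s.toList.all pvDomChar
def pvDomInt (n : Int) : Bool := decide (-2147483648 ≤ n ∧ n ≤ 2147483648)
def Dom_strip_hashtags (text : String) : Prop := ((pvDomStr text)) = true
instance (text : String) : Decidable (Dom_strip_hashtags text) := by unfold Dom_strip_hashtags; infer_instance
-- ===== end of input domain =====

-- B replaces A's 31 full-string replace() passes + split() + filter loop by one
-- character-at-a-time tokenizing scan (objective: faster, single pass).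

-- ===== PORT A =====
-- string.punctuation (module constant of Python's string library)
def pvPunctuation : List Char :=
  ['!', '"', '#', '$', '%', '&', '\'', '(', ')', '*', '+', ',', '-', '.', '/',
   ':', ';', '<', '=', '>', '?', '@', '[', '\\', ']', '^', '_', '`', '{', '|', '}', '~']

def strip_hashtags (text : String) : String :=
  let entity_prefixes : List Char := ['#']
  let text1 : String := pvPunctuation.foldl
    (fun t separator =>
      if separator ∉ entity_prefixes then
        PySem.Str.replace t (String.ofList [separator]) " "
      else t) text
  let words : List String := (PySem.Str.split₀ text1).foldl
    (fun words word =>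
      let word := PySem.Str.strip word
      if word ≠ "" then
        match PySem.Str.pyGet? word 0 with
        | some c => if c ∉ entity_prefixes then words ++ [word] else words
        | none => words
      else words) []
  PySem.Str.join " " words

-- ===== PORT B =====
-- seps = set(string.punctuation) - {'#'}
def pvSeps : PySem.Set Char :=
  PySem.Set.diff (PySem.Set.ofList pvPunctuation) (PySem.Set.ofList ['#'])

-- the character scan of Source B: buf is the current token, tokens the finished ones
def pvScan : List Char → List Char → List String → List String
  | [], buf, tokens =>
    if buf ≠ [] ∧ buf.head? ≠ some '#' then tokens ++ [String.ofList buf] else tokens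
  | ch :: rest, buf, tokens =>
    if PySem.Set.contains pvSeps ch || PySem.Chars.isspace ch then
      pvScan rest []
        (if buf ≠ [] ∧ buf.head? ≠ some '#' then tokens ++ [String.ofList buf] else tokens)
    else
      pvScan rest (buf ++ [ch]) tokens

def strip_hashtags_alt (text : String) : String :=
  PySem.Str.join " " (pvScan text.toList [] [])

-- ===== PRECONDITION & SPEC =====
def Spec_strip_hashtags (text : String) (out : String) : Prop := out = strip_hashtags_alt text
instance (text : String) (out : String) : Decidable (Spec_strip_hashtags text out) := by unfold Spec_strip_hashtags; infer_instance

-- ===== CLAIM (what is proved, stated in full; the proofs are below) =====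
def Claim_equal_strip_hashtags : Prop := ∀ (text : String), Dom_strip_hashtags text → Spec_strip_hashtags text (strip_hashtags text)

-- ===== LEMMAS AND PROOFS =====

-- the combined effect of A's replace loop on one character
def pvSub (c : Char) : Char := if c ∈ pvPunctuation ∧ c ≠ '#' then ' ' else c

-- single-character replace is a charwise map
theorem pv_rep_go (p : Char) :
    ∀ (l acc : List Char) (fuel : Nat), l.length ≤ fuel →
      PySem.Chars.replace.go [p] [' '] fuel l acc
        = acc.reverse ++ l.map (fun c => if c = p then ' ' else c) := by
  intro l
  induction l with
  | nil =>
    intro acc fuel _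
    cases fuel <;> simp [PySem.Chars.replace.go]
  | cons c t ih =>
    intro acc fuel hf
    cases fuel with
    | zero => simp at hf
    | succ fuel =>
      by_cases h : c = p
      · subst h
        simp [PySem.Chars.replace.go, List.isPrefixOf,
          ih (' ' :: acc) fuel (by simpa using hf)]
      · simp [PySem.Chars.replace.go, List.isPrefixOf, Ne.symm h, h,
          ih (c :: acc) fuel (by simpa using hf)]

theorem pv_replace_single (p : Char) (cs : List Char) :
    PySem.Chars.replace cs [p] [' '] = cs.map (fun c => if c = p then ' ' else c) := by
  simpa [PySem.Chars.replace] using pv_rep_go p cs [] cs.length le_rfl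

-- A's replace loop over a punctuation list L, at the character-list level
theorem pv_fold_replace (L : List Char) (t : String) :
    (L.foldl (fun t separator =>
        if separator ∉ ['#'] then
          PySem.Str.replace t (String.ofList [separator]) " "
        else t) t).toList
      = t.toList.map (fun c => if c ∈ L ∧ c ≠ '#' then ' ' else c) := by
  induction L generalizing t with
  | nil => simp
  | cons p L ih =>
    rw [List.foldl_cons]
    by_cases hp : p = '#'
    · subst hp
      rw [if_neg (by simp), ih t]
      refine List.map_congr_left (fun c _ => ?_)
      by_cases h2 : c = '#'
      · subst h2; simp
      · simp [h2]
    · rw [if_pos (by simp [hp]), ih, PySem.Str.toList_replace, String.toList_ofList]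
      have hsp : (" " : String).toList = [' '] := by decide
      rw [hsp, pv_replace_single, List.map_map]
      refine List.map_congr_left (fun c _ => ?_)
      simp only [Function.comp_apply]
      by_cases h2 : c = p
      · subst h2
        rw [if_pos rfl]
        by_cases h1 : (' ' ∈ L ∧ ' ' ≠ '#')
        · simp [hp]
        · simp [h1, hp]
      · rw [if_neg h2]
        by_cases h3 : c = '#'
        · subst h3; simp
        · by_cases h1 : c ∈ L
          · simp [h1, h3]
          · simp [h1, h2, h3]

-- split₀.go: the accumulator is a prefix of the result
theorem pv_split_go_acc (cs : List Char) :
    ∀ cur acc, PySem.Chars.split₀.go cs cur acc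
      = acc.reverse ++ PySem.Chars.split₀.go cs cur [] := by
  induction cs with
  | nil =>
    intro cur acc
    by_cases h : cur.isEmpty <;> simp [PySem.Chars.split₀.go, h]
  | cons c rest ih =>
    intro cur acc
    by_cases hs : PySem.Chars.isspace c
    · by_cases hc : cur.isEmpty
      · simp only [PySem.Chars.split₀.go, hs, hc, if_true]
        exact ih [] acc
      · simp only [PySem.Chars.split₀.go, hs, hc, if_true, if_false, Bool.false_eq_true]
        rw [ih [] (cur.reverse :: acc), ih [] [cur.reverse]]
        simp
    · simp only [PySem.Chars.split₀.go, hs, Bool.false_eq_true, if_false]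
      exact ih (c :: cur) acc

-- tokens produced by split₀.go are nonempty and whitespace-free
theorem pv_split_go_clean (cs : List Char) :
    ∀ cur acc,
      (∀ ch ∈ cur, PySem.Chars.isspace ch = false) →
      (∀ t ∈ acc, t ≠ [] ∧ ∀ ch ∈ t, PySem.Chars.isspace ch = false) →
      ∀ w ∈ PySem.Chars.split₀.go cs cur acc,
        w ≠ [] ∧ ∀ ch ∈ w, PySem.Chars.isspace ch = false := by
  induction cs with
  | nil =>
    intro cur acc hcur hacc w hw
    by_cases hc : cur.isEmpty
    · simp only [PySem.Chars.split₀.go, hc, if_true] at hw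
      exact hacc w (by simpa using hw)
    · simp only [PySem.Chars.split₀.go, hc, Bool.false_eq_true, if_false,
        List.reverse_cons, List.mem_append] at hw
      rcases hw with hw | hw
      · exact hacc w (by simpa using hw)
      · have hwc : w = cur.reverse := by simpa using hw
        subst hwc
        refine ⟨by simpa [List.isEmpty_iff] using hc,
          fun ch hch => hcur ch (by simpa using hch)⟩
  | cons c rest ih =>
    intro cur acc hcur hacc w hw
    by_cases hs : PySem.Chars.isspace c
    · by_cases hc : cur.isEmpty
      · simp only [PySem.Chars.split₀.go, hs, hc, if_true] at hw
        exact ih [] acc (by simp) hacc w hw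
      · simp only [PySem.Chars.split₀.go, hs, hc, if_true, Bool.false_eq_true, if_false] at hw
        refine ih [] (cur.reverse :: acc) (by simp) ?_ w hw
        intro t ht
        rcases List.mem_cons.mp ht with h | h
        · subst h
          exact ⟨by simpa [List.isEmpty_iff] using hc,
            fun ch hch => hcur ch (by simpa using hch)⟩
        · exact hacc t h
    · simp only [PySem.Chars.split₀.go, hs, Bool.false_eq_true, if_false] at hw
      refine ih (c :: cur) acc ?_ hacc w hw
      intro ch hch
      rcases List.mem_cons.mp hch with h | h
      · subst h; simpa using hs
      · exact hcur ch h

-- membership in B's separator set, spelled out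
theorem pv_contains_seps (c : Char) :
    PySem.Set.contains pvSeps c = true ↔ (c ∈ pvPunctuation ∧ c ≠ '#') := by
  rw [PySem.Set.contains_iff]
  unfold pvSeps
  rw [PySem.Set.mem_diff, PySem.Set.mem_ofList]
  simp [PySem.Set.mem_ofList]

-- a character is flushed by B exactly when its pvSub image is whitespace
theorem pv_sep_char (c : Char) :
    PySem.Chars.isspace (pvSub c)
      = (PySem.Set.contains pvSeps c || PySem.Chars.isspace c) := by
  by_cases h : c ∈ pvPunctuation ∧ c ≠ '#'
  · have hc : PySem.Set.contains pvSeps c = true := (pv_contains_seps c).mpr h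
    have hsub : pvSub c = ' ' := by simp [pvSub, h]
    rw [hsub, hc, Bool.true_or]
    decide
  · have hc : PySem.Set.contains pvSeps c = false := by
      rw [Bool.eq_false_iff]
      intro hct
      exact h ((pv_contains_seps c).mp hct)
    have hsub : pvSub c = c := by simp [pvSub, h]
    rw [hsub, hc, Bool.false_or]

-- the heart: B's scan computes filter-of-split₀ of A's substituted text
theorem pv_scan_eq (cs : List Char) :
    ∀ (buf : List Char) (toks : List String),
      pvScan cs buf toks
        = toks ++ ((PySem.Chars.split₀.go (cs.map pvSub) buf.reverse []).filter
            (fun w => w.head? != some '#')).map String.ofList := by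
  induction cs with
  | nil =>
    intro buf toks
    have hgo : PySem.Chars.split₀.go (([] : List Char).map pvSub) buf.reverse []
        = if buf = [] then [] else [buf] := by
      by_cases hb : buf = []
      · subst hb; simp [PySem.Chars.split₀.go]
      · simp [PySem.Chars.split₀.go, List.isEmpty_iff, hb]
    rw [hgo]
    by_cases hb : buf = []
    · simp [pvScan, hb]
    · by_cases hh : buf.head? = some '#'
      · simp [pvScan, hb, hh]
      · simp [pvScan, hb, hh]
  | cons c rest ih =>
    intro buf toks
    by_cases hsep : (PySem.Set.contains pvSeps c || PySem.Chars.isspace c) = true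
    · have hws : PySem.Chars.isspace (pvSub c) = true := by rw [pv_sep_char]; exact hsep
      have hstep : pvScan (c :: rest) buf toks
          = pvScan rest []
              (if buf ≠ [] ∧ buf.head? ≠ some '#' then toks ++ [String.ofList buf] else toks) := by
        simp only [pvScan]
        rw [if_pos hsep]
      rw [hstep, List.map_cons]
      by_cases hb : buf = []
      · subst hb
        have hgo : PySem.Chars.split₀.go (pvSub c :: List.map pvSub rest) (List.reverse []) []
            = PySem.Chars.split₀.go (List.map pvSub rest) [] [] := by
          simp only [List.reverse_nil, PySem.Chars.split₀.go]
          rw [if_pos hws]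
          simp
        rw [hgo, if_neg (by simp), ih [] toks]
        simp
      · have hbe : buf.reverse.isEmpty = false := by simp [hb]
        have hgo : PySem.Chars.split₀.go (pvSub c :: List.map pvSub rest) buf.reverse []
            = [buf] ++ PySem.Chars.split₀.go (List.map pvSub rest) [] [] := by
          simp only [PySem.Chars.split₀.go]
          rw [if_pos hws, if_neg (by simp [hbe])]
          rw [pv_split_go_acc (List.map pvSub rest) [] [buf.reverse.reverse]]
          simp
        by_cases hh : buf.head? = some '#'
        · rw [if_neg (fun hcon => hcon.2 hh), hgo, ih [] toks]
          simp [List.filter_append, hh]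
        · rw [if_pos ⟨hb, hh⟩, hgo, ih [] (toks ++ [String.ofList buf])]
          simp [List.filter_append, hh]
    · have hor := Bool.or_eq_false_iff.mp (Bool.eq_false_iff.mpr hsep)
      have hnotp : ¬(c ∈ pvPunctuation ∧ c ≠ '#') := by
        intro hq
        have hcq := (pv_contains_seps c).mpr hq
        rw [hor.1] at hcq
        exact Bool.false_ne_true hcq
      have hsub : pvSub c = c := by simp [pvSub, hnotp]
      have hstep : pvScan (c :: rest) buf toks = pvScan rest (buf ++ [c]) toks := by
        simp only [pvScan]
        rw [if_neg hsep]
      rw [hstep, ih (buf ++ [c]) toks, List.map_cons, hsub]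
      have hgo : PySem.Chars.split₀.go (c :: List.map pvSub rest) buf.reverse []
          = PySem.Chars.split₀.go (List.map pvSub rest) (c :: buf.reverse) [] := by
        simp only [PySem.Chars.split₀.go]
        rw [if_neg (by simp [hor.2])]
      rw [hgo]
      simp

-- stripping a whitespace-free token is the identity
theorem pv_strip_clean (tl : List Char)
    (h : ∀ ch ∈ tl, PySem.Chars.isspace ch = false) :
    PySem.Chars.strip tl = tl := by
  have hl : PySem.Chars.lstrip tl = tl := by
    unfold PySem.Chars.lstrip
    rw [List.dropWhile_eq_self_iff]
    intro hl
    simp [h tl[0] (List.getElem_mem hl)]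
  have hr : PySem.Chars.rstrip tl = tl := by
    unfold PySem.Chars.rstrip
    have hdw : List.dropWhile PySem.Chars.isspace tl.reverse = tl.reverse := by
      rw [List.dropWhile_eq_self_iff]
      intro hl
      rw [Bool.not_eq_true]
      exact h _ (List.mem_reverse.mp (List.getElem_mem hl))
    rw [hdw, List.reverse_reverse]
  unfold PySem.Chars.strip
  rw [hl, hr]

-- A's word loop over clean tokens is a filter
theorem pv_words_fold (l : List (List Char))
    (hcl : ∀ tl ∈ l, tl ≠ [] ∧ ∀ ch ∈ tl, PySem.Chars.isspace ch = false) :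
    ∀ init : List String,
      ((l.map String.ofList).foldl
        (fun words word =>
          let word := PySem.Str.strip word
          if word ≠ "" then
            match PySem.Str.pyGet? word 0 with
            | some c => if c ∉ ['#'] then words ++ [word] else words
            | none => words
          else words) init)
        = init ++ (l.filter (fun w => w.head? != some '#')).map String.ofList := by
  induction l with
  | nil => intro init; simp
  | cons tl l ih =>
    intro init
    obtain ⟨hne, hcf⟩ := hcl tl List.mem_cons_self
    have hstr : PySem.Str.strip (String.ofList tl) = String.ofList tl := by
      rw [← String.toList_inj, PySem.Str.toList_strip, String.toList_ofList]
      exact pv_strip_clean tl hcf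
    rcases tl with _ | ⟨ch, tl'⟩
    · exact absurd rfl hne
    · have hnz : String.ofList (ch :: tl') ≠ "" := by
        intro hq
        have hq' : (String.ofList (ch :: tl')).toList = ("" : String).toList := by rw [hq]
        simp at hq'
      have hget : PySem.Str.pyGet? (String.ofList (ch :: tl')) 0 = some ch := by
        rw [PySem.Str.pyGet?_eq, PySem.Chars.pyGet?_eq_listPyGet?, String.toList_ofList,
          PySem.List.pyGet?_zero]
        rfl
      rw [List.map_cons, List.foldl_cons]
      simp only [hstr, hget, if_pos hnz]
      by_cases hch : ch = '#'
      · subst hch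
        rw [if_neg (by decide), ih (fun t ht => hcl t (List.mem_cons_of_mem _ ht)) init]
        simp
      · rw [if_pos (by simp [hch]),
          ih (fun t ht => hcl t (List.mem_cons_of_mem _ ht)) (init ++ [String.ofList (ch :: tl')])]
        simp [hch]

-- the two ports agree on every string
set_option maxRecDepth 4096 in
theorem pv_main (text : String) : strip_hashtags text = strip_hashtags_alt text := by
  show PySem.Str.join " "
      ((PySem.Str.split₀
          (pvPunctuation.foldl
            (fun t separator =>
              if separator ∉ ['#'] then PySem.Str.replace t (String.ofList [separator]) " " else t)
            text)).foldl
        (fun words word =>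
          let word := PySem.Str.strip word
          if word ≠ "" then
            match PySem.Str.pyGet? word 0 with
            | some c => if c ∉ ['#'] then words ++ [word] else words
            | none => words
          else words) [])
    = PySem.Str.join " " (pvScan text.toList [] [])
  have h1 : (pvPunctuation.foldl
      (fun t separator =>
        if separator ∉ ['#'] then PySem.Str.replace t (String.ofList [separator]) " " else t)
      text).toList = text.toList.map pvSub := by
    rw [pv_fold_replace]
    rfl
  have h2 := PySem.Str.split₀_map_toList (pvPunctuation.foldl
      (fun t separator =>
        if separator ∉ ['#'] then PySem.Str.replace t (String.ofList [separator]) " " else t)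
      text)
  rw [h1] at h2
  have hid : ∀ ws : List String, ws.map (String.ofList ∘ String.toList) = ws := by
    intro ws
    induction ws with
    | nil => rfl
    | cons w ws ihw => simp [ihw, String.ofList_toList]
  have hsplit : PySem.Str.split₀ (pvPunctuation.foldl
      (fun t separator =>
        if separator ∉ ['#'] then PySem.Str.replace t (String.ofList [separator]) " " else t)
      text) = (PySem.Chars.split₀ (text.toList.map pvSub)).map String.ofList := by
    rw [← h2, List.map_map, hid]
  have hclean : ∀ tl ∈ PySem.Chars.split₀ (text.toList.map pvSub),
      tl ≠ [] ∧ ∀ ch ∈ tl, PySem.Chars.isspace ch = false := by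
    intro tl htl
    refine pv_split_go_clean (text.toList.map pvSub) [] [] (by simp) (by simp) tl ?_
    simpa [PySem.Chars.split₀] using htl
  rw [hsplit, pv_words_fold _ hclean [], pv_scan_eq text.toList [] []]
  simp [PySem.Chars.split₀]

-- ===== VERDICT (by name: the statement is the Claim_ definition above) =====
theorem strip_hashtags_spec : Claim_equal_strip_hashtags := by
  intro text _
  unfold Spec_strip_hashtags
  exact pv_main text
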